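-- pv_equiv track=rewrite | github.com/urban-toolkit/urbantk | src/pythonComponents/dataLoading/utils.py | from2dTo3d
-- ===== SOURCE A (Python) =====
-- def from2dTo3d(nodes, z_offset=0):
--     '''
--         Inserts a z position (z_offset can be applied)
--     '''
--     new_3d_node = []
--
--     index = 0
--     while(index < len(nodes)-1):
--         new_3d_node.append(nodes[index])
--         new_3d_node.append(nodes[index+1])
--         new_3d_node.append(0 + z_offset)
--         index += 2
--
--     return new_3d_node
-- ===== SOURCE B (Python) =====
-- def from2dTo3d(nodes, z_offset=0):
--     '''
--         Inserts a z position (z_offset can be applied)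
--     '''
--     m = len(nodes) // 2
--     return [z_offset if k % 3 == 2 else nodes[2 * (k // 3) + k % 3]
--             for k in range(3 * m)]
-- ===== Notes on version B (the rewrite author's own statement) =====
-- stated objective: alternative
-- what changed: B computes the output length 3*(len(nodes)//2) up front and fills each output slot k by closed-form index arithmetic (z_offset when k%3==2, else nodes[2*(k//3)+k%3]) instead of A's while loop that walks the input pairwise appending triples.
import Mathlib
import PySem

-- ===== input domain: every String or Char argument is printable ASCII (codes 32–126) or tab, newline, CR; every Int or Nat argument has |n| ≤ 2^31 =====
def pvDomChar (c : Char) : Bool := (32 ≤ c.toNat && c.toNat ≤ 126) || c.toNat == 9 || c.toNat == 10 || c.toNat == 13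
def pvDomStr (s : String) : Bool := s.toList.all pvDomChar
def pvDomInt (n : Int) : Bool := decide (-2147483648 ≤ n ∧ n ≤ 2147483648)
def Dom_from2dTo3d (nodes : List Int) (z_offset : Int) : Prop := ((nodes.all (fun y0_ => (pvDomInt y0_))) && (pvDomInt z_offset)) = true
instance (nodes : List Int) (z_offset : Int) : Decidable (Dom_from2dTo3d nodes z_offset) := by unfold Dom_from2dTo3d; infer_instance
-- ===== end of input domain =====

-- B builds the output by index arithmetic over its computed length 3*(len//2) instead of A's pairwise while loop: an alternative decomposition, same cost.


-- ===== PORT A =====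
-- A: index-driven while loop; nodes[index] / nodes[index+1] are always in range when
-- read (0 ≤ index and index+1 < len(nodes)), so the in-range read is `getD _ 0` (exact here).
def from2dTo3dLoop (nodes : List Int) (z_offset : Int) (index : Nat) (acc : List Int) : List Int :=
  if _h : (index : Int) < (nodes.length : Int) - 1 then
    from2dTo3dLoop nodes z_offset (index + 2)
      (acc ++ [nodes.getD index 0, nodes.getD (index + 1) 0, 0 + z_offset])
  else acc
termination_by nodes.length - index
decreasing_by omega

def from2dTo3d (nodes : List Int) (z_offset : Int) : List Int :=
  from2dTo3dLoop nodes z_offset 0 []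

-- ===== PORT B =====
-- B: output slot k of the 3*(len//2)-long result is z_offset when k%3==2, else
-- nodes[2*(k//3)+k%3]; that index is always in range, so `getD _ 0` is exact here.
def from2dTo3d_alt (nodes : List Int) (z_offset : Int) : List Int :=
  (List.range (3 * (nodes.length / 2))).map
    (fun k => if k % 3 == 2 then z_offset else nodes.getD (2 * (k / 3) + k % 3) 0)

-- ===== PRECONDITION & SPEC =====
def Spec_from2dTo3d (nodes : List Int) (z_offset : Int) (out : List Int) : Prop := out = from2dTo3d_alt nodes z_offset
instance (nodes : List Int) (z_offset : Int) (out : List Int) : Decidable (Spec_from2dTo3d nodes z_offset out) := by unfold Spec_from2dTo3d; infer_instance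

-- ===== CLAIM (what is proved, stated in full; the proofs are below) =====
def Claim_equal_from2dTo3d : Prop := ∀ (nodes : List Int) (z_offset : Int), Dom_from2dTo3d nodes z_offset → Spec_from2dTo3d nodes z_offset (from2dTo3d nodes z_offset)

-- ===== LEMMAS AND PROOFS =====

-- common pairwise characterisation both ports are reduced to
def pairTriples (z_offset : Int) : List Int → List Int
  | a :: b :: t => a :: b :: z_offset :: pairTriples z_offset t
  | _ => []

lemma from2dTo3dLoop_eq (nodes : List Int) (z_offset : Int) (i : Nat) (acc : List Int) :
    from2dTo3dLoop nodes z_offset i acc = acc ++ pairTriples (0 + z_offset) (nodes.drop i) := by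
  induction i, acc using from2dTo3dLoop.induct (nodes := nodes) (z_offset := z_offset) with
  | case1 i acc h ih =>
    have hi1 : i + 1 < nodes.length := by omega
    have hi : i < nodes.length := by omega
    have hdrop : nodes.drop i = nodes[i] :: nodes[i+1] :: nodes.drop (i + 2) := by
      rw [List.drop_eq_getElem_cons hi, List.drop_eq_getElem_cons hi1]
    have hg0 : nodes.getD i 0 = nodes[i] := List.getD_eq_getElem _ _ hi
    have hg1 : nodes.getD (i + 1) 0 = nodes[i+1] := List.getD_eq_getElem _ _ hi1
    rw [from2dTo3dLoop, dif_pos h, ih, hdrop, hg0, hg1, pairTriples]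
    simp
  | case2 i acc h =>
    rw [from2dTo3dLoop, dif_neg h]
    have : (nodes.drop i).length ≤ 1 := by simp; omega
    rcases hd : nodes.drop i with _ | ⟨a, _ | ⟨b, t⟩⟩ <;> simp_all [pairTriples]

lemma alt_eq (z_offset : Int) : ∀ (nodes : List Int),
    from2dTo3d_alt nodes z_offset = pairTriples z_offset nodes := by
  intro nodes
  induction nodes using pairTriples.induct with
  | case1 a b t ih =>
    unfold from2dTo3d_alt at ih ⊢
    have hsplit : 3 * ((a :: b :: t).length / 2) = 3 + 3 * (t.length / 2) := by
      simp; omega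
    rw [hsplit, List.range_add, List.map_append, List.map_map]
    have h1 : List.map
        (fun k => if k % 3 == 2 then z_offset else (a :: b :: t).getD (2 * (k / 3) + k % 3) 0)
        (List.range 3) = [a, b, z_offset] := by
      norm_num [List.range_succ]
    have h2 : List.map
        ((fun k => if k % 3 == 2 then z_offset else (a :: b :: t).getD (2 * (k / 3) + k % 3) 0)
          ∘ fun x => 3 + x)
        (List.range (3 * (t.length / 2))) =
        List.map (fun k => if k % 3 == 2 then z_offset else t.getD (2 * (k / 3) + k % 3) 0)
          (List.range (3 * (t.length / 2))) := by
      apply List.map_congr_left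
      intro k _
      have h3 : (3 + k) % 3 = k % 3 := by omega
      have h3' : (3 + k) / 3 = k / 3 + 1 := by omega
      simp only [Function.comp, h3, h3']
      by_cases hk : k % 3 == 2
      · simp [hk]
      · have heq : 2 * (k / 3 + 1) + k % 3 = (2 * (k / 3) + k % 3) + 1 + 1 := by ring
        simp [hk, heq]
    rw [h1, h2, ih, pairTriples]
    simp
  | case2 nodes h =>
    match nodes, h with
    | [], _ => simp [from2dTo3d_alt, pairTriples]
    | [a], _ => simp [from2dTo3d_alt, pairTriples]
    | a :: b :: t, h => exact absurd rfl (h a b t)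

-- ===== VERDICT (by name: the statement is the Claim_ definition above) =====
theorem from2dTo3d_spec : Claim_equal_from2dTo3d := by
  intro nodes z_offset _
  unfold Spec_from2dTo3d from2dTo3d
  rw [from2dTo3dLoop_eq, alt_eq, List.nil_append]
  norm_num
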